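-- pv_equiv track=rewrite | github.com/gksrb2656/AlgoPractice | heap/디스크컨트롤러.py | solution
-- ===== SOURCE A (Python) =====
-- import heapq
-- from collections import deque
--
-- def solution(jobs):
--     tasks = deque(sorted([(x[1], x[0]) for x in jobs], key=lambda y: (y[1], y[0])))
--     q = []
--     heapq.heappush(q, tasks.popleft())
--     current_time, total_response_time = 0, 0
--     while len(q) > 0:
--         dur, arr = heapq.heappop(q)
--         current_time = max(current_time + dur, arr + dur)
--         total_response_time += current_time - arr
--         while len(tasks) > 0 and tasks[0][1] <= current_time:
--             heapq.heappush(q, tasks.popleft())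
--         if len(tasks) > 0 and len(q) == 0:
--             heapq.heappush(q, tasks.popleft())
--     return total_response_time // len(jobs)
-- ===== SOURCE B (Python) =====
-- def solution(jobs):
--     # SJF scheduling without heapq/deque: plain list of ready jobs, min() scan each step.
--     pending = sorted([(x[1], x[0]) for x in jobs], key=lambda p: (p[1], p[0]))
--     ready = pending[:1]
--     pending = pending[1:]
--     t = 0
--     total = 0
--     while ready:
--         job = min(ready)
--         ready.remove(job)
--         dur, arr = job
--         t = max(t + dur, arr + dur)
--         total += t - arr
--         while pending and pending[0][1] <= t:
--             ready.append(pending.pop(0))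
--         if pending and not ready:
--             ready.append(pending.pop(0))
--     return total // len(jobs)
-- ===== Notes on version B (the rewrite author's own statement) =====
-- stated objective: simpler
-- what changed: Replaced the heapq binary heap + deque machinery with a plain list of ready jobs from which each step picks min() by a linear scan, consuming the pre-sorted pending list by pop(0); no imports needed.
import Mathlib
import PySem

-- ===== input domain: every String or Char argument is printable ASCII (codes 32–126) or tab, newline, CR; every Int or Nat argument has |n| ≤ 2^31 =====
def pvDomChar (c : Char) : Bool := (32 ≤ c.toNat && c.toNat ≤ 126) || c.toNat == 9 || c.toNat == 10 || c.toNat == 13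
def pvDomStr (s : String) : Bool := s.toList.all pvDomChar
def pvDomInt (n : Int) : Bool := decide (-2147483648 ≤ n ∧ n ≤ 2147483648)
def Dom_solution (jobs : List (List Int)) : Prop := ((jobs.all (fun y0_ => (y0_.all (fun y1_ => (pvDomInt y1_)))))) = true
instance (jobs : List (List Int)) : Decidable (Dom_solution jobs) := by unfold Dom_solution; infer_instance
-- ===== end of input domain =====

-- B replaces A's heapq heap + deque with a plain ready list scanned by min() each step: simpler, no imports.

-- Python tuple comparison on the (duration, arrival) pairs, lexicographic.
def pvLexLe (a b : Int × Int) : Bool := decide (a.1 < b.1 ∨ (a.1 = b.1 ∧ a.2 ≤ b.2))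
def pvLexLt (a b : Int × Int) : Bool := decide (a.1 < b.1 ∨ (a.1 = b.1 ∧ a.2 < b.2))

-- ===== PORT A =====
-- heapq.heappush / heappop on a list of tuples is modeled as a min-priority queue kept as an
-- ordered list: heappush = insert at the ordered position, heappop = take the head. This is
-- observationally exact: heappop returns exactly the minimum tuple currently in the heap.
def pvHPush (x : Int × Int) : List (Int × Int) → List (Int × Int)
  | [] => [x]
  | y :: ys => if pvLexLe x y then x :: y :: ys else y :: pvHPush x ys

theorem pvHPush_length (x : Int × Int) (l : List (Int × Int)) :
    (pvHPush x l).length = l.length + 1 := by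
  induction l with
  | nil => rfl
  | cons y ys ih => simp only [pvHPush]; split <;> simp [ih]

-- A's inner while loop: move tasks whose arrival ≤ t from the deque into the heap.
def pvFeedA (q tasks : List (Int × Int)) (t : Int) : List (Int × Int) × List (Int × Int) :=
  match tasks with
  | [] => (q, [])
  | (d, a) :: rest => if a ≤ t then pvFeedA (pvHPush (d, a) q) rest t else (q, (d, a) :: rest)

theorem pvFeedA_length (q tasks : List (Int × Int)) (t : Int) :
    (pvFeedA q tasks t).1.length + (pvFeedA q tasks t).2.length = q.length + tasks.length := by
  induction tasks generalizing q with
  | nil => simp [pvFeedA]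
  | cons p rest ih =>
    obtain ⟨d, a⟩ := p
    simp only [pvFeedA]
    split
    · have := ih (pvHPush (d, a) q); simp [pvHPush_length] at this ⊢; omega
    · simp

-- A's outer while loop over the heap q.
def pvLoopA (q tasks : List (Int × Int)) (t total : Int) : Int :=
  match q with
  | [] => total
  | (d, a) :: rest =>
    let t' := max (t + d) (a + d)
    match hpair : pvFeedA rest tasks t' with
    | (q', tasks') =>
      if h : tasks' ≠ [] ∧ q' = [] then
        pvLoopA (pvHPush (tasks'.headD (0, 0)) q') tasks'.tail t' (total + (t' - a))
      else
        pvLoopA q' tasks' t' (total + (t' - a))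
  termination_by q.length + tasks.length
  decreasing_by
  all_goals
    have hl := pvFeedA_length rest tasks (max (t + d) (a + d))
    rw [hpair] at hl
    simp only at hl
  · have h2 : tasks'.length ≠ 0 := fun hz => h.1 (List.length_eq_zero_iff.mp hz)
    simp only [pvHPush_length, h.2, List.length_tail, List.length_cons, List.length_nil]
    omega
  · simp only [List.length_cons]
    omega

def solution (jobs : List (List Int)) : Int :=
  -- tasks = deque(sorted([(x[1], x[0]) for x in jobs], key=lambda y: (y[1], y[0])))
  -- x[1]/x[0] are in range under Pre_solution (each job has ≥ 2 entries), so pyGetD is exact.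
  let tasks := PySem.List.sorted2
      (jobs.map (fun x => (PySem.List.pyGetD x 1 0, PySem.List.pyGetD x 0 0)))
      (fun y => y.2) (fun y => y.1)
  match tasks with
  | [] => 0  -- unreachable under Pre_solution: Python raises IndexError (popleft from empty deque)
  | t0 :: rest =>
    PySem.Int.floordiv (pvLoopA (pvHPush t0 []) rest 0 0) jobs.length

-- ===== PORT B =====
-- job = min(ready): Python min keeps the first minimal element; fold replacing only on strict <.
def pvMin (x : Int × Int) (xs : List (Int × Int)) : Int × Int :=
  xs.foldl (fun m c => if pvLexLt c m then c else m) x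

theorem pvMin_mem (x : Int × Int) (xs : List (Int × Int)) : pvMin x xs ∈ x :: xs := by
  induction xs generalizing x with
  | nil => simp [pvMin]
  | cons y ys ih =>
    have hstep : pvMin x (y :: ys) = pvMin (if pvLexLt y x = true then y else x) ys := rfl
    rw [hstep]
    rcases List.mem_cons.mp (ih (if pvLexLt y x = true then y else x)) with hh | hh
    · rw [hh]; split <;> simp
    · simp [hh]

-- B's inner while loop: append pending jobs whose arrival ≤ t to the ready list.
def pvFeedB (ready pending : List (Int × Int)) (t : Int) : List (Int × Int) × List (Int × Int) :=
  match pending with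
  | [] => (ready, [])
  | (d, a) :: rest =>
    if a ≤ t then pvFeedB (ready ++ [(d, a)]) rest t else (ready, (d, a) :: rest)

theorem pvFeedB_length (ready pending : List (Int × Int)) (t : Int) :
    (pvFeedB ready pending t).1.length + (pvFeedB ready pending t).2.length
      = ready.length + pending.length := by
  induction pending generalizing ready with
  | nil => simp [pvFeedB]
  | cons p rest ih =>
    obtain ⟨d, a⟩ := p
    simp only [pvFeedB]
    split
    · have := ih (ready ++ [(d, a)]); simp at this ⊢; omega
    · simp

-- B's outer while loop over the plain ready list.
def pvLoopB (ready pending : List (Int × Int)) (t total : Int) : Int :=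
  match ready with
  | [] => total
  | r0 :: rs =>
    let job := pvMin r0 rs
    let ready1 := (r0 :: rs).erase job   -- ready.remove(job): job ∈ ready, so erase is exact
    let t' := max (t + job.1) (job.2 + job.1)
    match hpair : pvFeedB ready1 pending t' with
    | (ready', pending') =>
      if h : pending' ≠ [] ∧ ready' = [] then
        pvLoopB (ready' ++ [pending'.headD (0, 0)]) pending'.tail t' (total + (t' - job.2))
      else
        pvLoopB ready' pending' t' (total + (t' - job.2))
  termination_by ready.length + pending.length
  decreasing_by
  all_goals
    have hm := pvMin_mem r0 rs
    have he : ((r0 :: rs).erase (pvMin r0 rs)).length = (r0 :: rs).length - 1 :=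
      List.length_erase_of_mem hm
    have hl := pvFeedB_length ((r0 :: rs).erase (pvMin r0 rs)) pending
      (max (t + (pvMin r0 rs).1) ((pvMin r0 rs).2 + (pvMin r0 rs).1))
    rw [hpair] at hl
    simp only [List.length_cons] at hl he
  · have h2 : pending'.length ≠ 0 := fun hz => h.1 (List.length_eq_zero_iff.mp hz)
    simp only [h.2, List.length_append, List.length_tail, List.length_cons,
      List.length_nil, List.length_cons]
    omega
  · simp only [List.length_cons]
    omega

def solution_alt (jobs : List (List Int)) : Int :=
  let pending := PySem.List.sorted2
      (jobs.map (fun x => (PySem.List.pyGetD x 1 0, PySem.List.pyGetD x 0 0)))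
      (fun y => y.2) (fun y => y.1)
  -- ready = pending[:1]; pending = pending[1:]
  PySem.Int.floordiv (pvLoopB (pending.take 1) (pending.drop 1) 0 0) jobs.length

-- ===== PRECONDITION & SPEC =====
-- Pre_ excludes only inputs where Python A raises: empty jobs (IndexError on popleft) and
-- jobs containing a sublist of fewer than 2 entries (IndexError on x[1]).
def Pre_solution (jobs : List (List Int)) : Prop :=
  jobs ≠ [] ∧ ∀ j ∈ jobs, 2 ≤ j.length
instance (jobs : List (List Int)) : Decidable (Pre_solution jobs) := by
  unfold Pre_solution; infer_instance

def pvWitness_solution : List (List Int) := [[0, 3], [1, 9], [2, 6]]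

def Spec_solution (jobs : List (List Int)) (out : Int) : Prop := out = solution_alt jobs
instance (jobs : List (List Int)) (out : Int) : Decidable (Spec_solution jobs out) := by
  unfold Spec_solution; infer_instance

-- ===== CLAIM (what is proved, stated in full; the proofs are below) =====
def Claim_equal_solution : Prop :=
  ∀ (jobs : List (List Int)), Dom_solution jobs → Pre_solution jobs →
    Spec_solution jobs (solution jobs)

-- ===== LEMMAS AND PROOFS =====

theorem pvLexLe_refl (a : Int × Int) : pvLexLe a a = true := by
  simp [pvLexLe]

theorem pvLexLe_trans {a b c : Int × Int}
    (h1 : pvLexLe a b = true) (h2 : pvLexLe b c = true) : pvLexLe a c = true := by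
  simp only [pvLexLe, decide_eq_true_eq] at *; omega

theorem pvLexLe_antisymm {a b : Int × Int}
    (h1 : pvLexLe a b = true) (h2 : pvLexLe b a = true) : a = b := by
  simp only [pvLexLe, decide_eq_true_eq] at h1 h2
  obtain ⟨a1, a2⟩ := a; obtain ⟨b1, b2⟩ := b
  simp only [Prod.mk.injEq] at *
  omega

theorem pvLexLe_of_not_le {a b : Int × Int} (h : ¬ pvLexLe a b = true) : pvLexLe b a = true := by
  simp only [pvLexLe, decide_eq_true_eq] at *; omega

theorem pvLexLt_le {a b : Int × Int} (h : pvLexLt a b = true) : pvLexLe a b = true := by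
  simp only [pvLexLt, pvLexLe, decide_eq_true_eq] at *; omega

theorem pvLexLe_of_not_lt {a b : Int × Int} (h : ¬ pvLexLt a b = true) : pvLexLe b a = true := by
  simp only [pvLexLt, pvLexLe, decide_eq_true_eq] at *; omega

theorem pvHPush_perm (x : Int × Int) (l : List (Int × Int)) :
    (pvHPush x l).Perm (x :: l) := by
  induction l with
  | nil => simp [pvHPush]
  | cons y ys ih =>
    simp only [pvHPush]
    split
    · exact List.Perm.refl _
    · exact (ih.cons y).trans (List.Perm.swap x y ys)

theorem pvHPush_sorted {l : List (Int × Int)} (x : Int × Int)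
    (h : l.Pairwise (fun a b => pvLexLe a b = true)) :
    (pvHPush x l).Pairwise (fun a b => pvLexLe a b = true) := by
  induction l with
  | nil => simp [pvHPush]
  | cons y ys ih =>
    rcases List.pairwise_cons.mp h with ⟨hy, hys⟩
    simp only [pvHPush]
    split
    · rename_i hxy
      refine List.pairwise_cons.mpr ⟨?_, h⟩
      intro z hz
      rcases List.mem_cons.mp hz with rfl | hz
      · exact hxy
      · exact pvLexLe_trans hxy (hy _ hz)
    · rename_i hxy
      refine List.pairwise_cons.mpr ⟨?_, ih hys⟩
      intro z hz
      rcases List.mem_cons.mp ((pvHPush_perm x ys).mem_iff.mp hz) with rfl | hz'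
      · exact pvLexLe_of_not_le hxy
      · exact hy _ hz'

theorem pvFeed_rel {q ready : List (Int × Int)} (tasks : List (Int × Int)) (t : Int)
    (hp : q.Perm ready) :
    (pvFeedA q tasks t).1.Perm (pvFeedB ready tasks t).1 ∧
    (pvFeedA q tasks t).2 = (pvFeedB ready tasks t).2 := by
  induction tasks generalizing q ready with
  | nil => simpa [pvFeedA, pvFeedB] using hp
  | cons p rest ih =>
    obtain ⟨d, a⟩ := p
    simp only [pvFeedA, pvFeedB]
    split
    · exact ih ((pvHPush_perm (d, a) q).trans
        ((hp.cons (d, a)).trans (List.perm_append_singleton (d, a) ready).symm))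
    · exact ⟨hp, rfl⟩

theorem pvFeedA_sorted {q : List (Int × Int)} (tasks : List (Int × Int)) (t : Int)
    (h : q.Pairwise (fun a b => pvLexLe a b = true)) :
    (pvFeedA q tasks t).1.Pairwise (fun a b => pvLexLe a b = true) := by
  induction tasks generalizing q with
  | nil => simpa [pvFeedA] using h
  | cons p rest ih =>
    obtain ⟨d, a⟩ := p
    simp only [pvFeedA]
    split
    · exact ih (pvHPush_sorted _ h)
    · exact h

theorem pvMin_le (x : Int × Int) (xs : List (Int × Int)) :
    ∀ y ∈ x :: xs, pvLexLe (pvMin x xs) y = true := by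
  induction xs generalizing x with
  | nil =>
    intro y hy
    rcases List.mem_cons.mp hy with rfl | hy
    · exact pvLexLe_refl _
    · simp at hy
  | cons z zs ih =>
    intro y hy
    have hstep : pvMin x (z :: zs) = pvMin (if pvLexLt z x = true then z else x) zs := rfl
    have hx' : pvLexLe (if pvLexLt z x = true then z else x) x = true := by
      split
      · exact pvLexLt_le (by assumption)
      · exact pvLexLe_refl x
    have hz' : pvLexLe (if pvLexLt z x = true then z else x) z = true := by
      split
      · exact pvLexLe_refl z
      · exact pvLexLe_of_not_lt (by assumption)
    have hhead := ih (if pvLexLt z x = true then z else x) _ (List.mem_cons_self ..)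
    rw [hstep]
    rcases List.mem_cons.mp hy with rfl | hy
    · exact pvLexLe_trans hhead hx'
    · rcases List.mem_cons.mp hy with rfl | hy
      · exact pvLexLe_trans hhead hz'
      · exact ih _ _ (List.mem_cons_of_mem _ hy)

theorem pvMin_eq_head {h0 : Int × Int} {rest ready : List (Int × Int)}
    (hs : (h0 :: rest).Pairwise (fun a b => pvLexLe a b = true))
    (hp : (h0 :: rest).Perm ready) (r0 : Int × Int) (rs : List (Int × Int))
    (hr : ready = r0 :: rs) :
    pvMin r0 rs = h0 := by
  subst hr
  have hmem : pvMin r0 rs ∈ h0 :: rest := hp.symm.subset (pvMin_mem r0 rs)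
  have hle : pvLexLe (pvMin r0 rs) h0 = true :=
    pvMin_le r0 rs h0 (hp.subset (List.mem_cons_self ..))
  rcases List.mem_cons.mp hmem with heq | hmem
  · exact heq
  · exact pvLexLe_antisymm hle ((List.pairwise_cons.mp hs).1 _ hmem)

theorem pvLoop_eq (n : Nat) :
    ∀ (q tasks ready : List (Int × Int)) (t total : Int),
      q.length + tasks.length = n →
      q.Perm ready →
      q.Pairwise (fun a b => pvLexLe a b = true) →
      pvLoopA q tasks t total = pvLoopB ready tasks t total := by
  induction n using Nat.strong_induction_on with
  | _ n ih =>
    intro q tasks ready t total hn hp hs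
    cases q with
    | nil =>
      have hre : ready = [] := hp.symm.eq_nil
      subst hre
      rw [pvLoopA, pvLoopB]
    | cons hd rest =>
      obtain ⟨d, a⟩ := hd
      cases ready with
      | nil => exact absurd hp.eq_nil (by simp)
      | cons r0 rs =>
        have hmin : pvMin r0 rs = (d, a) := pvMin_eq_head hs hp r0 rs rfl
        have hper : ((r0 :: rs).erase (pvMin r0 rs)).Perm rest := by
          rw [hmin]
          simpa [List.erase_cons_head] using (hp.symm.erase (d, a))
        have hlen : ((r0 :: rs).erase (pvMin r0 rs)).length = rest.length := hper.length_eq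
        rw [pvLoopA, pvLoopB]
        simp only [hmin]
        have hp2 : rest.Perm ((r0 :: rs).erase (d, a)) := by
          rw [← hmin]; exact hper.symm
        have hrel := pvFeed_rel tasks (max (t + d) (a + d)) hp2
        obtain ⟨hperm, heq2⟩ := hrel
        have hlA := pvFeedA_length rest tasks (max (t + d) (a + d))
        set T := max (t + d) (a + d) with hT
        set qA := (pvFeedA rest tasks T).1 with hqA
        set tA := (pvFeedA rest tasks T).2 with htA
        set rB := (pvFeedB ((r0 :: rs).erase (d, a)) tasks T).1 with hrB
        set pB := (pvFeedB ((r0 :: rs).erase (d, a)) tasks T).2 with hpB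
        simp only [List.length_cons] at hn
        by_cases hc : tA ≠ [] ∧ qA = []
        · have hrBnil : rB = [] := by
            have h' := hperm
            rw [hc.2] at h'
            exact (h'.symm.eq_nil)
          have hcB : pB ≠ [] ∧ rB = [] := ⟨by rw [← heq2]; exact hc.1, hrBnil⟩
          rw [dif_pos hc, dif_pos hcB]
          rw [hc.2, hrBnil, ← heq2]
          have hm : 1 + tA.tail.length < n := by
            have h1 : tA.length ≠ 0 := fun hz => hc.1 (List.length_eq_zero_iff.mp hz)
            rw [hc.2] at hlA
            simp only [List.length_nil, List.length_tail] at hlA ⊢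
            omega
          exact ih _ hm _ _ _ _ _ rfl (List.Perm.refl _) (by simp [pvHPush])
        · have hcB : ¬(pB ≠ [] ∧ rB = []) := by
            rintro ⟨h1, h2⟩
            refine hc ⟨?_, ?_⟩
            · rw [heq2]; exact h1
            · rw [h2] at hperm; exact hperm.eq_nil
          rw [dif_neg hc, dif_neg hcB]
          rw [← heq2]
          have hm : qA.length + tA.length < n := by omega
          exact ih _ hm _ _ _ _ _ rfl hperm
            (pvFeedA_sorted tasks T (List.pairwise_cons.mp hs).2)

-- ===== VERDICT (by name: the statement is the Claim_ definition above) =====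
theorem solution_spec : Claim_equal_solution := by
  unfold Claim_equal_solution Spec_solution solution solution_alt
  intro jobs _ hpre
  simp only []
  cases hL : PySem.List.sorted2
      (jobs.map (fun x => (PySem.List.pyGetD x 1 0, PySem.List.pyGetD x 0 0)))
      (fun y => y.2) (fun y => y.1) with
  | nil =>
    exfalso
    have hperm := PySem.List.sorted2_perm
      (jobs.map (fun x => (PySem.List.pyGetD x 1 0, PySem.List.pyGetD x 0 0)))
      (fun y => y.2) (fun y => y.1) false
    rw [hL] at hperm
    have : jobs.map (fun x => (PySem.List.pyGetD x 1 0, PySem.List.pyGetD x 0 0)) = [] :=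
      hperm.symm.eq_nil
    exact hpre.1 (List.map_eq_nil_iff.mp this)
  | cons t0 rest =>
    simp only [List.take_succ_cons, List.take_zero, List.drop_succ_cons, List.drop_zero]
    congr 1
    exact pvLoop_eq _ (pvHPush t0 []) rest [t0] 0 0 rfl (List.Perm.refl _) (by simp [pvHPush])
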